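-- pv_equiv track=rewrite | github.com/smitgajjar/Competitive-Programming | aug19b/ENCODING.py | getsum_modified
-- ===== SOURCE A (Python) =====
-- mod=1000000007
--
-- def getsum_modified(n):
--     s=str(n)
--     i=0
--     temp=''
--     while i < len(s):
--         val=s[i]
--         temp+=s[i]
--         i+=1
--
--         if i>len(s)-1:
--             break
--
--         while(s[i]==val):
--             temp+='0'
--             i+=1
--             if i>len(s)-1:
--                 break
--     return int(temp)%mod
-- ===== SOURCE B (Python) =====
-- mod=1000000007
--
-- def _collapse(m):
--     # m >= 0: its decimal number with every digit that repeats its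
--     # more-significant neighbour replaced by 0 (pure arithmetic, no strings)
--     if m == 0:
--         return 0
--     d = m % 10
--     q = m // 10
--     keep = d if (q == 0 or q % 10 != d) else 0
--     return _collapse(q) * 10 + keep
--
-- def getsum_modified(n):
--     v = _collapse(-n) if n < 0 else _collapse(n)
--     return (-v if n < 0 else v) % mod
-- ===== Notes on version B (the rewrite author's own statement) =====
-- stated objective: alternative
-- what changed: B drops the string scan entirely: it recurses on the number itself with divmod-by-10, zeroing each digit that equals its more-significant neighbour, instead of A's index-based nested while loops over str(n) that build a new string and re-parse it with int().
import Mathlib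
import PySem

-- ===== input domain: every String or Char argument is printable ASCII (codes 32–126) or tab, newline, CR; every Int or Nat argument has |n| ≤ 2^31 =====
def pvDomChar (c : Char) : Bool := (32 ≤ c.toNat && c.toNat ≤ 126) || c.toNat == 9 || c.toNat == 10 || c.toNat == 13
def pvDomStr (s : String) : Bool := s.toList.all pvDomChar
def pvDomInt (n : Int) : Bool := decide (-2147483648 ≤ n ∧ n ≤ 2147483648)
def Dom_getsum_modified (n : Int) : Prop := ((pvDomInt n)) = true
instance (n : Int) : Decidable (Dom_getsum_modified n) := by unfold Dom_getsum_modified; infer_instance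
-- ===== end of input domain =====

-- B replaces A's nested-while scan over str(n) (build temp, re-parse with int()) by a
-- divmod-by-10 recursion on the number itself; alternative (same cost), no string round-trip.

-- ===== PORT A =====
-- A's outer while takes s[i] as the new run value and appends it; the inner while
-- appends '0' while s[i] equals that value.  The two loops advance one shared index,
-- so together they are one left-to-right pass carrying the current run value `val`
-- (none before the first character): that pass, transcribed:
def pvARun : Option Char → List Char → List Char
  | _, [] => []
  | none, c :: rest => c :: pvARun (some c) rest
  | some val, c :: rest =>
      if c = val then '0' :: pvARun (some val) rest
      else c :: pvARun (some c) rest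

-- int(temp), ported by hand: temp is always str(n) with some digits replaced by '0',
-- i.e. an optional '-' followed by decimal digits — on exactly that shape this is
-- Python's int() (whitespace/'+'/underscores never occur in temp).
def pvDigitsVal (cs : List Char) : Nat := cs.foldl (fun a c => a * 10 + (c.toNat - 48)) 0
def pvIntOf (cs : List Char) : Int :=
  if cs.head? = some '-' then -(pvDigitsVal cs.tail : Int) else (pvDigitsVal cs : Int)

def getsum_modified (n : Int) : Int :=
  let s := PySem.Int.toChars n
  let temp := pvARun none s
  PySem.Int.mod (pvIntOf temp) 1000000007

-- ===== PORT B =====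
-- _collapse(m) from Source B: recurse on m // 10, keep the last digit iff it differs
-- from its more-significant neighbour (or is the leading digit).
def pvCollapse (m : Nat) : Nat :=
  if h : m = 0 then 0
  else
    let d := m % 10
    let q := m / 10
    let keep := if q = 0 ∨ q % 10 ≠ d then d else 0
    pvCollapse q * 10 + keep
decreasing_by exact Nat.div_lt_self (Nat.pos_of_ne_zero h) (by norm_num)

def getsum_modified_alt (n : Int) : Int :=
  let v : Int := if n < 0 then ((pvCollapse (-n).toNat : Nat) : Int) else ((pvCollapse n.toNat : Nat) : Int)
  PySem.Int.mod (if n < 0 then -v else v) 1000000007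

-- ===== PRECONDITION & SPEC =====
def Spec_getsum_modified (n : Int) (out : Int) : Prop := out = getsum_modified_alt n
instance (n : Int) (out : Int) : Decidable (Spec_getsum_modified n out) := by unfold Spec_getsum_modified; infer_instance

-- ===== CLAIM (what is proved, stated in full; the proofs are below) =====
def Claim_equal_getsum_modified : Prop := ∀ (n : Int), Dom_getsum_modified n → Spec_getsum_modified n (getsum_modified n)

-- ===== LEMMAS AND PROOFS =====

-- run value carried by pvARun after a prefix xs starting from state v
def pvLast (v : Option Char) (xs : List Char) : Option Char := xs.getLast?.or v

theorem pvLast_cons (v : Option Char) (x : Char) (xs : List Char) :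
    pvLast v (x :: xs) = pvLast (some x) xs := by
  cases xs <;> simp [pvLast, List.getLast?_cons]

theorem pvARun_append (xs : List Char) (v : Option Char) (c : Char) :
    pvARun v (xs ++ [c]) = pvARun v xs ++ [if pvLast v xs = some c then '0' else c] := by
  induction xs generalizing v with
  | nil =>
    cases v with
    | none => simp [pvARun, pvLast]
    | some val =>
      simp only [List.nil_append, pvARun, pvLast, List.getLast?_nil, Option.or]
      by_cases h : c = val
      · subst h; simp
      · have hvc : some val ≠ some c := fun hs => h (Option.some.inj hs).symm
        simp [h, hvc]
  | cons x xs ih =>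
    cases v with
    | none => simp [pvARun, pvLast_cons, ih]
    | some val =>
      by_cases h : x = val
      · simp [pvARun, h, pvLast_cons, ih]
      · simp [pvARun, h, pvLast_cons, ih]

theorem pvDigitsVal_append (xs : List Char) (c : Char) :
    pvDigitsVal (xs ++ [c]) = pvDigitsVal xs * 10 + (c.toNat - 48) := by
  simp [pvDigitsVal, List.foldl_append]

theorem digitChar_inj_iff : ∀ a < 10, ∀ b < 10,
    ((Nat.digitChar a = Nat.digitChar b) ↔ a = b) := by decide

theorem digitChar_val : ∀ a < 10, (Nat.digitChar a).toNat - 48 = a := by decide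

theorem getLast?_toDigits (m : Nat) :
    (Nat.toDigits 10 m).getLast? = some (Nat.digitChar (m % 10)) := by
  rw [Nat.toDigits_eq_if (by norm_num)]
  by_cases h : m < 10
  · simp [h, Nat.mod_eq_of_lt h]
  · simp [h]

theorem pvCollapse_lt10 (m : Nat) (h : m < 10) : pvCollapse m = m := by
  rw [pvCollapse]
  by_cases h0 : m = 0
  · simp [h0]
  · have hq : m / 10 = 0 := Nat.div_eq_of_lt h
    simp [h0, hq, pvCollapse, Nat.mod_eq_of_lt h]

theorem main_nat : ∀ m : Nat, pvDigitsVal (pvARun none (Nat.toDigits 10 m)) = pvCollapse m := by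
  intro m
  induction m using Nat.strong_induction_on with
  | _ m ih =>
    rw [Nat.toDigits_eq_if (by norm_num)]
    by_cases h : m < 10
    · simp only [h, if_true]
      have : pvARun none [Nat.digitChar m] = [Nat.digitChar m] := by simp [pvARun]
      rw [this, pvCollapse_lt10 m h]
      simpa [pvDigitsVal] using digitChar_val m h
    · simp only [h, if_false]
      have hm10 : 10 ≤ m := le_of_not_gt h
      have hql : m / 10 < m := Nat.div_lt_self (by omega) (by norm_num)
      rw [pvARun_append]
      have hlast : pvLast none (Nat.toDigits 10 (m / 10)) = some (Nat.digitChar (m / 10 % 10)) := by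
        simp [pvLast, getLast?_toDigits]
      rw [hlast, pvDigitsVal_append, ih (m / 10) hql]
      have hiff := digitChar_inj_iff (m / 10 % 10) (Nat.mod_lt _ (by norm_num))
        (m % 10) (Nat.mod_lt _ (by norm_num))
      conv_rhs => rw [pvCollapse]
      have hm0 : ¬ m = 0 := by omega
      have hq0 : ¬ m / 10 = 0 := by omega
      by_cases he : m / 10 % 10 = m % 10
      · have : (some (Nat.digitChar (m / 10 % 10)) = some (Nat.digitChar (m % 10))) := by
          rw [he]
        simp only [this, if_true]
        rw [dif_neg hm0, if_neg (by simp [hq0, he])]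
        have h0 : '0'.toNat - 48 = 0 := by decide
        rw [h0]
      · have hne : ¬ (some (Nat.digitChar (m / 10 % 10)) = some (Nat.digitChar (m % 10))) := by
          simp only [Option.some.injEq]; exact fun hh => he (hiff.mp hh)
        simp only [hne, if_false]
        rw [dif_neg hm0, if_pos (Or.inr he), digitChar_val (m % 10) (Nat.mod_lt _ (by norm_num))]

theorem toDigits_head_digit (m : Nat) :
    ∃ c t, Nat.toDigits 10 m = c :: t ∧ c.isDigit = true := by
  have hpos : 0 < (Nat.toDigits 10 m).length := Nat.length_toDigits_pos
  cases hD : Nat.toDigits 10 m with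
  | nil => rw [hD] at hpos; simp at hpos
  | cons c t =>
    refine ⟨c, t, rfl, ?_⟩
    exact Nat.isDigit_of_mem_toDigits (by norm_num) (by norm_num) (hD ▸ List.mem_cons_self)

theorem digit_ne_dash (c : Char) (h : c.isDigit = true) : c ≠ '-' := by
  intro he; subst he; simp [Char.isDigit] at h

theorem pvARun_none_nat (m : Nat) : pvIntOf (pvARun none (Nat.toDigits 10 m)) = (pvCollapse m : Int) := by
  obtain ⟨c, t, hD, hc⟩ := toDigits_head_digit m
  rw [hD]
  have hrun : pvARun none (c :: t) = c :: pvARun (some c) t := by simp [pvARun]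
  rw [hrun, pvIntOf]
  have : ¬ ((c :: pvARun (some c) t).head? = some '-') := by
    simp [digit_ne_dash c hc]
  rw [if_neg this]
  have := main_nat m
  rw [hD, hrun] at this
  exact congrArg _ this

theorem pvARun_dash_skip (m : Nat) :
    pvARun (some '-') (Nat.toDigits 10 m) = pvARun none (Nat.toDigits 10 m) := by
  obtain ⟨c, t, hD, hc⟩ := toDigits_head_digit m
  rw [hD]
  simp [pvARun, digit_ne_dash c hc]

-- ===== VERDICT (by name: the statement is the Claim_ definition above) =====
theorem getsum_modified_spec : Claim_equal_getsum_modified := by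
  intro n _
  unfold Spec_getsum_modified getsum_modified getsum_modified_alt PySem.Int.toChars
  by_cases hn : n < 0
  · simp only [hn, if_true]
    have hrun : pvARun none ('-' :: Nat.toDigits 10 n.natAbs)
        = '-' :: pvARun (some '-') (Nat.toDigits 10 n.natAbs) := by simp [pvARun]
    rw [hrun]
    have hhead : (('-' :: pvARun (some '-') (Nat.toDigits 10 n.natAbs)).head? = some '-') := by simp
    rw [pvIntOf, if_pos hhead]
    simp only [List.tail_cons]
    rw [pvARun_dash_skip]
    have hval := main_nat n.natAbs
    rw [hval]
    have habs : (-n).toNat = n.natAbs := by omega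
    rw [habs]
  · simp only [hn, if_false]
    rw [pvARun_none_nat n.toNat]
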